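-- pv_equiv track=rewrite | github.com/largesone/uavs_planV0.2 | migration_temp/test_files/strategic_scenario_test.py | calculate_state_dimension
-- ===== SOURCE A (Python) =====
-- def calculate_state_dimension(uavs, targets, graph):
--     """计算状态向量的实际维度"""
--     state_dim = 0
--
--     # 目标信息：位置(3) + 剩余资源(3) + 总资源(3) = 9
--     for t in targets:
--         state_dim += 9
--
--     # 无人机信息：位置(3) + 资源(3) + 航向(1) + 距离(1) = 8
--     for u in uavs:
--         state_dim += 8
--
--     # 协同信息：每个目标4个指标
--     for t in targets:
--         state_dim += 4  # 拥挤度、完成度、边际效用、紧迫度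
--
--     # 全局协同信息：总体完成度(1) + 均衡度(1) = 2
--     state_dim += 2
--
--     return state_dim
-- ===== SOURCE B (Python) =====
-- def calculate_state_dimension(uavs, targets, graph):
--     """计算状态向量的实际维度"""
--     return 13 * len(targets) + 8 * len(uavs) + 2
-- ===== Notes on version B (the rewrite author's own statement) =====
-- stated objective: faster
-- what changed: Replaced the three accumulation loops over targets and uavs with the closed form 13*len(targets)+8*len(uavs)+2.
import Mathlib
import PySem

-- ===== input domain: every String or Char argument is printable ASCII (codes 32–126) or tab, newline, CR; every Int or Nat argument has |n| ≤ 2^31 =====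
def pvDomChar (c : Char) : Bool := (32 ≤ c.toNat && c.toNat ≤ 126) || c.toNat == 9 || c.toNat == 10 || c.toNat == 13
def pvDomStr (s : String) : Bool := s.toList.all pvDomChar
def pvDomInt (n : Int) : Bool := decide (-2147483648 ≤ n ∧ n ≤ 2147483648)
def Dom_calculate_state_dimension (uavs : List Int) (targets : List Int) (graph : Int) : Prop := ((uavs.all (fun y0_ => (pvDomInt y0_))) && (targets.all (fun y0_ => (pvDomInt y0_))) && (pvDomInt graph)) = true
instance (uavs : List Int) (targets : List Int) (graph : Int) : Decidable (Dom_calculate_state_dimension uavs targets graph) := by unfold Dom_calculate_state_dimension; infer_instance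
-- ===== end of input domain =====

-- ===== PORT A =====
-- literal transliteration of A: three folds accumulating constants, then +2
def calculate_state_dimension (uavs : List Int) (targets : List Int) (graph : Int) : Int :=
  let state_dim : Int := 0
  let state_dim := targets.foldl (fun acc _ => acc + 9) state_dim
  let state_dim := uavs.foldl (fun acc _ => acc + 8) state_dim
  let state_dim := targets.foldl (fun acc _ => acc + 4) state_dim
  state_dim + 2

-- ===== PORT B =====
-- B: closed form (faster: O(1) vs O(n))
def calculate_state_dimension_alt (uavs : List Int) (targets : List Int) (graph : Int) : Int :=
  13 * (targets.length : Int) + 8 * (uavs.length : Int) + 2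

-- ===== PRECONDITION & SPEC =====
def Spec_calculate_state_dimension (uavs : List Int) (targets : List Int) (graph : Int) (out : Int) : Prop := out = calculate_state_dimension_alt uavs targets graph
instance (uavs : List Int) (targets : List Int) (graph : Int) (out : Int) : Decidable (Spec_calculate_state_dimension uavs targets graph out) := by unfold Spec_calculate_state_dimension; infer_instance

-- ===== CLAIM (what is proved, stated in full; the proofs are below) =====
def Claim_equal_calculate_state_dimension : Prop := ∀ (uavs : List Int) (targets : List Int) (graph : Int), Dom_calculate_state_dimension uavs targets graph → Spec_calculate_state_dimension uavs targets graph (calculate_state_dimension uavs targets graph)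

-- ===== LEMMAS AND PROOFS =====

-- ===== VERDICT (by name: the statement is the Claim_ definition above) =====
theorem foldl_add_const (c : Int) (l : List Int) (a : Int) :
    l.foldl (fun acc _ => acc + c) a = a + c * l.length := by
  induction l generalizing a with
  | nil => simp
  | cons x xs ih => simp [List.foldl, ih]; ring

theorem calculate_state_dimension_spec : Claim_equal_calculate_state_dimension := by
  intro uavs targets graph _
  unfold Spec_calculate_state_dimension calculate_state_dimension calculate_state_dimension_alt
  simp [foldl_add_const]; ring
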